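-- pv_equiv track=rewrite | github.com/yuma-ando/COESO_Cooperation_Analytics | Integrated_Cooperation_Analytics/saved_functions/asymmetry_all_functions.py | user_to_introduced_terms
-- ===== SOURCE A (Python) =====
-- def user_to_introduced_terms(term_to_score_to_sender):
--     user_to_introduced_terms = {}
--     for k,v in term_to_score_to_sender.items():
--
--         if v[1] not in user_to_introduced_terms:
--         # if 2 separate users used term or max value when first sender twice and another person once used it
--             user_to_introduced_terms[v[1]] = [(k, v[0])]
--         else:
--             user_to_introduced_terms[v[1]].append((k, v[0]))
--
--     user_to_introduced_terms = {k: [{el[0]:el[1]} for el in v] for k,v in user_to_introduced_terms.items()}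
--     user_to_introduced_terms = {key: {k: v for d in value for k, v in d.items()} for key, value in user_to_introduced_terms.items()}
--     return user_to_introduced_terms
-- ===== SOURCE B (Python) =====
-- def user_to_introduced_terms(term_to_score_to_sender):
--     items = list(term_to_score_to_sender.items())
--     senders = list(dict.fromkeys(v[1] for _, v in items))
--     return {s: {k: v[0] for k, v in items if v[1] == s} for s in senders}
-- ===== Notes on version B (the rewrite author's own statement) =====
-- stated objective: alternative
-- what changed: B first computes the ordered list of distinct senders (dict.fromkeys) and then builds each sender's term->score dict by a separate filtering pass over the items, instead of A's incremental per-item accumulation into lists of tuples followed by two merge comprehensions.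
import Mathlib
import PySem

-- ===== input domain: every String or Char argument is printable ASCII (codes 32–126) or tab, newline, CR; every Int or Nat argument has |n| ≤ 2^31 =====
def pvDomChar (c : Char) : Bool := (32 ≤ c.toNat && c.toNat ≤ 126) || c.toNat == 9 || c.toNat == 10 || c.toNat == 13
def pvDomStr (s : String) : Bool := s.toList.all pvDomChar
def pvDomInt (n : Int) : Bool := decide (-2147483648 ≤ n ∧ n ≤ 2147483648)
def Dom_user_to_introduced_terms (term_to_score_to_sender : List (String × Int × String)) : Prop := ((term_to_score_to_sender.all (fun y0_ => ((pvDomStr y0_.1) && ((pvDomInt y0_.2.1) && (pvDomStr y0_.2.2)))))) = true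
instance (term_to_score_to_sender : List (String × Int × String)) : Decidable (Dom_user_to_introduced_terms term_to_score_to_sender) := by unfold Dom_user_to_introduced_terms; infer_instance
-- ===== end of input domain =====

-- B lists the distinct senders first and builds each sender's term→score dict by its own
-- filtering pass over the items, replacing A's incremental accumulation plus two merge
-- comprehensions (objective: alternative; not faster).

-- ===== PORT A =====
def user_to_introduced_terms (term_to_score_to_sender : List (String × Int × String)) : List (String × List (String × Int)) :=
  -- the parameter is a Python dict; iterate its items
  let d := PySem.Dict.ofList term_to_score_to_sender
  -- for k,v in d.items(): if v[1] not in u: u[v[1]] = [(k,v[0])] else: u[v[1]].append((k,v[0]))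
  let u : PySem.Dict String (List (String × Int)) :=
    d.items.foldl (fun u kv =>
      if u.contains kv.2.2 = false then u.insert kv.2.2 [(kv.1, kv.2.1)]
      else u.modify kv.2.2 [] (fun l => l ++ [(kv.1, kv.2.1)])) PySem.Dict.empty
  -- {k: [{el[0]:el[1]} for el in v] for k,v in u.items()}
  let u2 : PySem.Dict String (List (PySem.Dict String Int)) :=
    u.items.foldl (fun acc p => acc.insert p.1 (p.2.map (fun el => PySem.Dict.ofList [(el.1, el.2)]))) PySem.Dict.empty
  -- {key: {k: v for d in value for k, v in d.items()} for key, value in u2.items()}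
  let u3 : PySem.Dict String (PySem.Dict String Int) :=
    u2.items.foldl (fun acc p =>
      acc.insert p.1 (p.2.foldl (fun m dd => dd.items.foldl (fun m q => m.insert q.1 q.2) m) PySem.Dict.empty)) PySem.Dict.empty
  u3.items.map (fun p => (p.1, p.2.items))

-- ===== PORT B =====
def user_to_introduced_terms_alt (term_to_score_to_sender : List (String × Int × String)) : List (String × List (String × Int)) :=
  -- items = list(term_to_score_to_sender.items())
  let l := (PySem.Dict.ofList term_to_score_to_sender).items
  -- senders = list(dict.fromkeys(v[1] for _, v in items))
  let senders := PySem.List.dedup (l.map (fun kv => kv.2.2))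
  -- {s: {k: v[0] for k, v in items if v[1] == s} for s in senders}
  let r : PySem.Dict String (PySem.Dict String Int) :=
    senders.foldl (fun r s =>
      r.insert s ((l.filter (fun kv => kv.2.2 == s)).foldl
        (fun m kv => m.insert kv.1 kv.2.1) PySem.Dict.empty)) PySem.Dict.empty
  r.items.map (fun p => (p.1, p.2.items))

-- ===== PRECONDITION & SPEC =====
def Spec_user_to_introduced_terms (term_to_score_to_sender : List (String × Int × String)) (out : List (String × List (String × Int))) : Prop := out = user_to_introduced_terms_alt term_to_score_to_sender
instance (term_to_score_to_sender : List (String × Int × String)) (out : List (String × List (String × Int))) : Decidable (Spec_user_to_introduced_terms term_to_score_to_sender out) := by unfold Spec_user_to_introduced_terms; infer_instance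

-- ===== CLAIM =====
def Claim_equal_user_to_introduced_terms : Prop := ∀ (term_to_score_to_sender : List (String × Int × String)), Dom_user_to_introduced_terms term_to_score_to_sender → Spec_user_to_introduced_terms term_to_score_to_sender (user_to_introduced_terms term_to_score_to_sender)

-- ===== LEMMAS AND PROOFS =====

-- a fold of `modify` at key `key x`, read back with getD at c: only the entries whose key is c act.
theorem pv_getD_foldl_modify {κ ν α : Type} [BEq κ] [LawfulBEq κ] [DecidableEq κ]
    (l : List α) (key : α → κ) (f : α → ν → ν) (d : PySem.Dict κ ν) (d0 : ν) (c : κ) :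
    (l.foldl (fun d x => d.modify (key x) d0 (f x)) d).getD c d0
      = (l.filter (fun x => key x == c)).foldl (fun v x => f x v) (d.getD c d0) := by
  induction l generalizing d with
  | nil => rfl
  | cons a t ih =>
    by_cases h : key a = c
    · simp [List.foldl_cons, ih, h]
    · simp [List.foldl_cons, ih, h, PySem.Dict.getD_modify, Ne.symm h]

-- inserting a list of pairs with distinct keys into the empty dict yields exactly that list.
theorem pv_items_foldl_insert_pairs {κ ν : Type} [BEq κ] [LawfulBEq κ]
    (v : List (κ × ν)) (hnd : (v.map Prod.fst).Nodup) :
    (v.foldl (fun m q => m.insert q.1 q.2) PySem.Dict.empty).items = v := by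
  have := PySem.Dict.items_foldl_insert_fresh v Prod.fst Prod.snd PySem.Dict.empty
    (by intro a _; simp) hnd
  simpa using this

theorem pv_filter_fst_nodup {l : List (String × Int × String)}
    (hnd : (l.map Prod.fst).Nodup) (c : String) :
    ((l.filter (fun x => x.2.2 == c)).map Prod.fst).Nodup :=
  hnd.sublist (List.Sublist.map Prod.fst List.filter_sublist)

theorem user_to_introduced_terms_eq (ts : List (String × Int × String)) :
    user_to_introduced_terms ts = user_to_introduced_terms_alt ts := by
  simp only [user_to_introduced_terms, user_to_introduced_terms_alt]
  set l := (PySem.Dict.ofList ts).items with hl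
  have hnd : (l.map Prod.fst).Nodup := PySem.Dict.nodup_keys_ofList ts
  -- A's first loop is a modify-fold
  have hA1 : l.foldl (fun u kv =>
      if u.contains kv.2.2 = false then u.insert kv.2.2 [(kv.1, kv.2.1)]
      else u.modify kv.2.2 [] (fun v => v ++ [(kv.1, kv.2.1)])) PySem.Dict.empty
    = l.foldl (fun u kv => u.modify kv.2.2 [] (fun v => v ++ [(kv.1, kv.2.1)])) PySem.Dict.empty := by
    apply PySem.List.foldl_congr_mem
    intro u kv _
    by_cases h : u.contains kv.2.2 = false
    · simp [h, PySem.Dict.modify, PySem.Dict.getD_of_not_contains u [] h]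
    · simp [h]
  rw [hA1]
  set u := l.foldl (fun u kv => u.modify kv.2.2 [] (fun v => v ++ [(kv.1, kv.2.1)])) PySem.Dict.empty with hu
  set r := (PySem.List.dedup (l.map (fun kv => kv.2.2))).foldl (fun r s =>
      r.insert s ((l.filter (fun kv => kv.2.2 == s)).foldl
        (fun m kv => m.insert kv.1 kv.2.1) PySem.Dict.empty)) PySem.Dict.empty with hr
  -- A's keys are the distinct senders in first-occurrence order, same list as B's `senders`
  have hku : u.keys = PySem.Set.ofList (l.map (fun kv => kv.2.2)) := by
    have := PySem.Dict.keys_foldl_modify_key l (fun kv => kv.2.2) ([] : List (String × Int))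
      (fun _ kv => fun v => v ++ [(kv.1, kv.2.1)]) PySem.Dict.empty
    simpa [PySem.Set.update_nil_left] using this
  have hnu : u.keys.Nodup := by rw [hku]; exact PySem.Set.nodup_ofList _
  have hndsenders : (PySem.List.dedup (l.map (fun kv => kv.2.2))).Nodup :=
    PySem.List.nodup_dedup _
  -- B: a fold of inserts over the distinct senders appends in order
  have hB : r.items = (PySem.List.dedup (l.map (fun kv => kv.2.2))).map (fun s =>
      (s, (l.filter (fun kv => kv.2.2 == s)).foldl
        (fun m kv => m.insert kv.1 kv.2.1) PySem.Dict.empty)) := by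
    have := PySem.Dict.items_foldl_insert_fresh (PySem.List.dedup (l.map (fun kv => kv.2.2)))
      (fun s => s)
      (fun s => (l.filter (fun kv => kv.2.2 == s)).foldl
        (fun m kv => m.insert kv.1 kv.2.1) PySem.Dict.empty)
      PySem.Dict.empty (by intro a _; simp) (by simpa using hndsenders)
    simpa using this
  -- A's per-sender list
  have hgu : ∀ c, u.getD c [] = (l.filter (fun x => x.2.2 == c)).map (fun x => (x.1, x.2.1)) := by
    intro c
    rw [hu, pv_getD_foldl_modify l (fun kv => kv.2.2) (fun kv v => v ++ [(kv.1, kv.2.1)])]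
    simpa using PySem.List.foldl_append_singleton_eq_map
      (l := l.filter (fun x => x.2.2 == c)) (f := fun x => (x.1, x.2.1)) (acc := [])
  -- A's two comprehension dicts: built over fresh distinct keys, so items map directly
  have hu2 : ∀ (g : List (String × Int) → List (PySem.Dict String Int)),
      (u.items.foldl (fun acc p => acc.insert p.1 (g p.2)) PySem.Dict.empty).items
        = u.items.map (fun p => (p.1, g p.2)) := by
    intro g
    have := PySem.Dict.items_foldl_insert_fresh u.items Prod.fst (fun p => g p.2)
      PySem.Dict.empty (by intro a _; simp) hnu
    simpa using this
  have hu3 : ∀ (g : List (PySem.Dict String Int) → PySem.Dict String Int)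
      (items2 : List (String × List (PySem.Dict String Int))),
      (items2.map Prod.fst).Nodup →
      (items2.foldl (fun acc p => acc.insert p.1 (g p.2)) PySem.Dict.empty).items
        = items2.map (fun p => (p.1, g p.2)) := by
    intro g items2 hnd2
    have := PySem.Dict.items_foldl_insert_fresh items2 Prod.fst (fun p => g p.2)
      PySem.Dict.empty (by intro a _; simp) hnd2
    simpa using this
  rw [hu2, hu3 _ _ (by simpa [List.map_map, Function.comp] using hnu), hB,
    PySem.Dict.items_eq_map_keys u hnu ([]), hku, PySem.List.dedup_eq_ofList]
  simp only [List.map_map]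
  apply List.map_congr_left
  intro c _
  simp only [Function.comp]
  refine Prod.ext rfl ?_
  show ((((u.getD c []).map (fun el => PySem.Dict.ofList [(el.1, el.2)])).foldl
      (fun m dd => dd.items.foldl (fun m q => m.insert q.1 q.2) m) PySem.Dict.empty)).items
    = ((l.filter (fun kv => kv.2.2 == c)).foldl
        (fun m kv => m.insert kv.1 kv.2.1) PySem.Dict.empty).items
  rw [List.foldl_map]
  have hmerge : ((u.getD c []).foldl
      (fun m el => (PySem.Dict.ofList [(el.1, el.2)]).items.foldl (fun m q => m.insert q.1 q.2) m) PySem.Dict.empty)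
    = ((u.getD c []).foldl (fun m el => m.insert el.1 el.2) PySem.Dict.empty) := by
    apply PySem.List.foldl_congr_mem
    intro m el _
    rfl
  have hBc : ((l.filter (fun kv => kv.2.2 == c)).foldl
      (fun m kv => m.insert kv.1 kv.2.1) PySem.Dict.empty).items
      = (l.filter (fun kv => kv.2.2 == c)).map (fun x => (x.1, x.2.1)) := by
    have := PySem.Dict.items_foldl_insert_fresh (l.filter (fun kv => kv.2.2 == c))
      (fun x => x.1) (fun x => x.2.1) PySem.Dict.empty (by intro a _; simp)
      (pv_filter_fst_nodup hnd c)
    simpa using this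
  rw [hmerge, hBc, hgu]
  have : (((l.filter (fun x => x.2.2 == c)).map (fun x => (x.1, x.2.1))).map Prod.fst).Nodup := by
    simpa [List.map_map, Function.comp] using pv_filter_fst_nodup hnd c
  exact pv_items_foldl_insert_pairs _ this

-- ===== VERDICT =====
theorem user_to_introduced_terms_spec : Claim_equal_user_to_introduced_terms := by
  intro ts _
  unfold Spec_user_to_introduced_terms
  exact user_to_introduced_terms_eq ts
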